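-- pv_equiv track=rewrite | github.com/knowledgetechnologyuhh/augmented_grasping_3d | modules/language_translation/transformer/keras_transformer/utils/helper.py | parenthesis_split
-- ===== SOURCE A (Python) =====
-- def parenthesis_split(sentence, delimiter=" ", lparen="[", rparen="]"):
--     nb_brackets=0
--     sentence = sentence.strip(delimiter) # get rid of leading/trailing seps
--
--     l=[0]
--     for i,c in enumerate(sentence):
--         if c==lparen:
--             nb_brackets+=1
--         elif c==rparen:
--             nb_brackets-=1
--         elif c==delimiter and nb_brackets==0:
--             l.append(i)
--         # handle malformed string
--         if nb_brackets<0: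
--             raise Exception("Syntax error")
--
--     l.append(len(sentence))
--     # handle missing closing parentheses
--     if nb_brackets>0:
--         raise Exception("Syntax error")
--     return([sentence[i:j].strip(delimiter) for i,j in zip(l,l[1:])])
-- ===== SOURCE B (Python) =====
-- def parenthesis_split(sentence, delimiter=" ", lparen="[", rparen="]"):
--     depth = 0
--     sentence = sentence.strip(delimiter)
--     buf = []
--     tokens = []
--     for c in sentence:
--         if c == lparen:
--             depth += 1
--             buf.append(c)
--         elif c == rparen:
--             depth -= 1
--             buf.append(c)
--         elif c == delimiter and depth == 0:
--             tokens.append(''.join(buf).strip(delimiter))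
--             buf = []
--         else:
--             buf.append(c)
--         if depth < 0:
--             raise Exception("Syntax error")
--     if depth > 0:
--         raise Exception("Syntax error")
--     tokens.append(''.join(buf).strip(delimiter))
--     return tokens
-- ===== Notes on version B (the rewrite author's own statement) =====
-- stated objective: simpler
-- what changed: A collects split indices in a list and afterwards slices the stripped sentence at consecutive index pairs; B makes one pass that builds each token directly in a character buffer and emits it at every top-level delimiter, with no index list and no slicing phase.
import Mathlib
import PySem

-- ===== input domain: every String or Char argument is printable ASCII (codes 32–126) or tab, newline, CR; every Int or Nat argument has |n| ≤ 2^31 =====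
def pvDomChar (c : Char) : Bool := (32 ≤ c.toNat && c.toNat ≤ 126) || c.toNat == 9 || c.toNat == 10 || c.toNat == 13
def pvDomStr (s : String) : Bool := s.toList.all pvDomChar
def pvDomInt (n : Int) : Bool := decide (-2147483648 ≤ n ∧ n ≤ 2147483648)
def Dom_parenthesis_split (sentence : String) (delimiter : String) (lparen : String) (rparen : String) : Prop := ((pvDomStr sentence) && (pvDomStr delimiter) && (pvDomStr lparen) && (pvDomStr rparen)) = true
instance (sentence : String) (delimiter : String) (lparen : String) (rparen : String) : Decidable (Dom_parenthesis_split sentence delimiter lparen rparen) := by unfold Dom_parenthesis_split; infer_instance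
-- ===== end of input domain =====

-- B replaces A's collect-split-indices-then-slice scheme by a single pass that builds each token
-- directly in a character buffer (objective: simpler decomposition, same O(n) cost).


-- ===== PORT A =====
-- literal port of A: strip the delimiter, fold over enumerate(sentence) collecting split
-- indices (the raise on unbalanced brackets is excluded by Pre_ below), then slice and strip.
def parenthesis_split (sentence : String) (delimiter : String) (lparen : String) (rparen : String) : List String :=
  let s := PySem.Chars.stripChars sentence.toList delimiter.toList
  let st := (PySem.List.enumerate s 0).foldl
    (fun (st : Int × List Int) ic =>
      if [ic.2] = lparen.toList then (st.1 + 1, st.2)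
      else if [ic.2] = rparen.toList then (st.1 - 1, st.2)
      else if [ic.2] = delimiter.toList ∧ st.1 = 0 then (st.1, st.2 ++ [ic.1])
      else (st.1, st.2)) ((0 : Int), [(0 : Int)])
  let l := st.2 ++ [(s.length : Int)]
  (l.zip l.tail).map (fun ij =>
    String.ofList (PySem.Chars.stripChars (PySem.List.slice s (some ij.1) (some ij.2)) delimiter.toList))

-- ===== PORT B =====
-- literal port of B: strip the delimiter, one fold building the tokens directly in a buffer.
def parenthesis_split_alt (sentence : String) (delimiter : String) (lparen : String) (rparen : String) : List String :=
  let s := PySem.Chars.stripChars sentence.toList delimiter.toList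
  let st := s.foldl
    (fun (st : Int × List Char × List String) c =>
      if [c] = lparen.toList then (st.1 + 1, st.2.1 ++ [c], st.2.2)
      else if [c] = rparen.toList then (st.1 - 1, st.2.1 ++ [c], st.2.2)
      else if [c] = delimiter.toList ∧ st.1 = 0 then
        (st.1, ([] : List Char), st.2.2 ++ [String.ofList (PySem.Chars.stripChars st.2.1 delimiter.toList)])
      else (st.1, st.2.1 ++ [c], st.2.2)) ((0 : Int), ([] : List Char), ([] : List String))
  st.2.2 ++ [String.ofList (PySem.Chars.stripChars st.2.1 delimiter.toList)]

-- ===== PRECONDITION & SPEC =====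
-- Pre_ excludes exactly the inputs on which the Python A raises its syntax-error Exception (B raises there too):
-- those where, scanning the stripped sentence, the bracket depth ever goes negative or ends positive.
def Pre_parenthesis_split (sentence : String) (delimiter : String) (lparen : String) (rparen : String) : Prop :=
  let s := PySem.Chars.stripChars sentence.toList delimiter.toList
  let isL := fun c => decide ([c] = lparen.toList)
  let isR := fun c => decide (¬ [c] = lparen.toList ∧ [c] = rparen.toList)
  (∀ n ∈ List.range (s.length + 1), (s.take n).countP isR ≤ (s.take n).countP isL) ∧
  s.countP isL = s.countP isR
instance (sentence : String) (delimiter : String) (lparen : String) (rparen : String) : Decidable (Pre_parenthesis_split sentence delimiter lparen rparen) := by unfold Pre_parenthesis_split; infer_instance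

def pvWitness_parenthesis_split : String × String × String × String := ("a [b c] d", " ", "[", "]")

def Spec_parenthesis_split (sentence : String) (delimiter : String) (lparen : String) (rparen : String) (out : List String) : Prop := out = parenthesis_split_alt sentence delimiter lparen rparen
instance (sentence : String) (delimiter : String) (lparen : String) (rparen : String) (out : List String) : Decidable (Spec_parenthesis_split sentence delimiter lparen rparen out) := by unfold Spec_parenthesis_split; infer_instance

-- ===== CLAIM (what is proved, stated in full; the proofs are below) =====
def Claim_equal_parenthesis_split : Prop := ∀ (sentence : String) (delimiter : String) (lparen : String) (rparen : String), Dom_parenthesis_split sentence delimiter lparen rparen → Pre_parenthesis_split sentence delimiter lparen rparen → Spec_parenthesis_split sentence delimiter lparen rparen (parenthesis_split sentence delimiter lparen rparen)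

-- ===== LEMMAS AND PROOFS =====

theorem pv_strip_cons_of_mem (c : Char) (xs cs : List Char) (h : c ∈ cs) :
    PySem.Chars.stripChars (c :: xs) cs = PySem.Chars.stripChars xs cs := by
  simp [PySem.Chars.stripChars, h]

theorem pv_zip_tail_concat (l0 : List Int) (a x : Int) :
    ((l0 ++ [a, x]).zip (l0 ++ [a, x]).tail) = ((l0 ++ [a]).zip (l0 ++ [a]).tail) ++ [(a, x)] := by
  induction l0 with
  | nil => simp
  | cons y l ih =>
    cases l with
    | nil => simp
    | cons z l' => simpa using ih


set_option maxHeartbeats 1000000 in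
theorem pv_main (delimiter lparen rparen : String) (s : List Char) :
  ∀ (t p : List Char) (nb : Int) (l0 : List Int) (lst : Nat) (buf : List Char) (out : List String),
    s = p ++ t → lst ≤ p.length →
    (∀ r : List Char, PySem.Chars.stripChars (p.drop lst ++ r) delimiter.toList
        = PySem.Chars.stripChars (buf ++ r) delimiter.toList) →
    out = ((l0 ++ [(lst : Int)]).zip (l0 ++ [(lst : Int)]).tail).map (fun ij =>
        String.ofList (PySem.Chars.stripChars (PySem.List.slice s (some ij.1) (some ij.2)) delimiter.toList)) →
    (let stA := (PySem.List.enumerate t (p.length : Int)).foldl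
        (fun (st : Int × List Int) ic =>
          if [ic.2] = lparen.toList then (st.1 + 1, st.2)
          else if [ic.2] = rparen.toList then (st.1 - 1, st.2)
          else if [ic.2] = delimiter.toList ∧ st.1 = 0 then (st.1, st.2 ++ [ic.1])
          else (st.1, st.2)) (nb, l0 ++ [(lst : Int)])
     let l := stA.2 ++ [(s.length : Int)]
     (l.zip l.tail).map (fun ij =>
        String.ofList (PySem.Chars.stripChars (PySem.List.slice s (some ij.1) (some ij.2)) delimiter.toList)))
    =
    (let stB := t.foldl (fun (st : Int × List Char × List String) c =>
          if [c] = lparen.toList then (st.1 + 1, st.2.1 ++ [c], st.2.2)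
          else if [c] = rparen.toList then (st.1 - 1, st.2.1 ++ [c], st.2.2)
          else if [c] = delimiter.toList ∧ st.1 = 0 then
            (st.1, ([] : List Char), st.2.2 ++ [String.ofList (PySem.Chars.stripChars st.2.1 delimiter.toList)])
          else (st.1, st.2.1 ++ [c], st.2.2)) (nb, buf, out)
     stB.2.2 ++ [String.ofList (PySem.Chars.stripChars stB.2.1 delimiter.toList)]) := by
  intro t
  induction t with
  | nil =>
    intro p nb l0 lst buf out hs hlst H Hout
    rw [List.append_nil] at hs
    subst hs
    simp only [PySem.List.enumerate, List.foldl_nil]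
    rw [List.append_assoc, List.singleton_append, pv_zip_tail_concat]
    rw [List.map_append, ← Hout]
    congr 1
    simp only [List.map_cons, List.map_nil]
    rw [PySem.List.slice_natCast]
    rw [List.take_of_length_le (by simp), ← List.append_nil (s.drop lst), H, List.append_nil]
  | cons c t' ih =>
    intro p nb l0 lst buf out hs hlst H Hout
    rw [PySem.List.enumerate_cons]
    have hs' : s = (p ++ [c]) ++ t' := by simp [hs]
    have hlenn : ((p : List Char).length : Int) + 1 = ((p ++ [c]).length : Int) := by simp
    have Hext : ∀ r : List Char, PySem.Chars.stripChars ((p ++ [c]).drop lst ++ r) delimiter.toList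
        = PySem.Chars.stripChars ((buf ++ [c]) ++ r) delimiter.toList := by
      intro r
      rw [List.drop_append_of_le_length hlst, List.append_assoc, List.append_assoc]
      exact H ([c] ++ r)
    by_cases h1 : [c] = lparen.toList
    · simp only [List.foldl_cons]
      rw [if_pos h1, if_pos h1, hlenn]
      exact ih (p ++ [c]) (nb + 1) l0 lst (buf ++ [c]) out hs' (le_trans hlst (by simp)) Hext Hout
    · by_cases h2 : [c] = rparen.toList
      · simp only [List.foldl_cons]
        rw [if_neg h1, if_neg h1, if_pos h2, if_pos h2, hlenn]
        exact ih (p ++ [c]) (nb - 1) l0 lst (buf ++ [c]) out hs' (le_trans hlst (by simp)) Hext Hout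
      · by_cases h3 : [c] = delimiter.toList ∧ nb = 0
        · have hc : c ∈ delimiter.toList := by rw [← h3.1]; simp
          simp only [List.foldl_cons]
          rw [if_neg h1, if_neg h1, if_neg h2, if_neg h2, if_pos h3, if_pos h3, hlenn]
          have Hnew : ∀ r : List Char, PySem.Chars.stripChars ((p ++ [c]).drop p.length ++ r) delimiter.toList
              = PySem.Chars.stripChars (([] : List Char) ++ r) delimiter.toList := by
            intro r
            rw [List.drop_append_of_le_length le_rfl, List.drop_length, List.nil_append, List.singleton_append]
            simpa using pv_strip_cons_of_mem c r delimiter.toList hc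
          have Houtnew : out ++ [String.ofList (PySem.Chars.stripChars buf delimiter.toList)]
              = (((l0 ++ [(lst : Int)]) ++ [((p.length : Nat) : Int)]).zip ((l0 ++ [(lst : Int)]) ++ [((p.length : Nat) : Int)]).tail).map
                (fun ij => String.ofList (PySem.Chars.stripChars (PySem.List.slice s (some ij.1) (some ij.2)) delimiter.toList)) := by
            rw [List.append_assoc, List.singleton_append, pv_zip_tail_concat, List.map_append, ← Hout]
            congr 1
            simp only [List.map_cons, List.map_nil]
            rw [PySem.List.slice_natCast, hs, List.drop_append_of_le_length hlst,
              show p.length - lst = (p.drop lst).length by simp, List.take_left,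
              ← List.append_nil (p.drop lst), H, List.append_nil]
          exact ih (p ++ [c]) nb (l0 ++ [(lst : Int)]) p.length [] _ hs' (by simp) Hnew Houtnew
        · simp only [List.foldl_cons]
          rw [if_neg h1, if_neg h1, if_neg h2, if_neg h2, if_neg h3, if_neg h3, hlenn]
          exact ih (p ++ [c]) nb l0 lst (buf ++ [c]) out hs' (le_trans hlst (by simp)) Hext Hout

-- ===== VERDICT (by name: the statement is the Claim_ definition above) =====
theorem parenthesis_split_spec : Claim_equal_parenthesis_split := by
  intro sentence delimiter lparen rparen _ _
  unfold Spec_parenthesis_split parenthesis_split parenthesis_split_alt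
  exact pv_main delimiter lparen rparen (PySem.Chars.stripChars sentence.toList delimiter.toList)
    (PySem.Chars.stripChars sentence.toList delimiter.toList) [] 0 [] 0 [] [] rfl le_rfl
    (fun r => rfl) (by simp)
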